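-- pv_equiv track=rewrite | github.com/charz09/codechanges | MY FILES/Ed2/renameVar6clone.py | isArrayClassified
-- ===== SOURCE A (Python) =====
-- def isArrayClassified(mainArray, idx):
--     mainArray.pop(idx)
--     index = 0
--     while index < len(mainArray)-1:
--         if mainArray[index] > mainArray[index+1]:
--             return False
--         index += 1
--     return True
-- ===== SOURCE B (Python) =====
-- def isArrayClassified(mainArray, idx):
--     mainArray.pop(idx)
--     return mainArray == sorted(mainArray)
-- ===== Notes on version B (the rewrite author's own statement) =====
-- stated objective: idiomatic
-- what changed: The explicit index-driven while-loop adjacent-pair scan is replaced by popping and then comparing the remaining list with its sorted copy (mainArray == sorted(mainArray)).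
import Mathlib
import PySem

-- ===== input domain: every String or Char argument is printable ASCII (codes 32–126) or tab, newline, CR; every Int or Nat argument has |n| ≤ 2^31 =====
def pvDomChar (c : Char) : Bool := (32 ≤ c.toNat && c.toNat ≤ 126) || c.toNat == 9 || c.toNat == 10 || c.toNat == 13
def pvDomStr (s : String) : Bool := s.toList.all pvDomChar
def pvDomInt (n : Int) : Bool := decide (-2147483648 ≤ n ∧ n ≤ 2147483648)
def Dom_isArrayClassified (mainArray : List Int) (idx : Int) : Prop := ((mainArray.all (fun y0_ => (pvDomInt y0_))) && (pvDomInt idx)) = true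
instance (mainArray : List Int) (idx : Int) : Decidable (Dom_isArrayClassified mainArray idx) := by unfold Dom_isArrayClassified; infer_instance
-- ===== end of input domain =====

-- B replaces A's index-driven adjacent-pair while-loop by comparing the popped list with its
-- sorted copy (idiomatic, not faster). Both A and B pop mainArray in place; the equivalence
-- proved here is about the RETURN value only.

-- ===== PORT A =====
-- the while-loop: scan adjacent pairs, early-return False on a descent
def pvScanA : List Int → Bool
  | a :: b :: t => if a > b then false else pvScanA (b :: t)
  | _ => true

def isArrayClassified (mainArray : List Int) (idx : Int) : Bool :=
  match PySem.List.pop? mainArray idx with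
  | none => false            -- IndexError in Python; excluded by Pre_
  | some (_, rest) => pvScanA rest

-- ===== PORT B =====
def isArrayClassified_alt (mainArray : List Int) (idx : Int) : Bool :=
  match PySem.List.pop? mainArray idx with
  | none => false            -- IndexError in Python; excluded by Pre_
  | some (_, rest) => decide (rest = PySem.List.sorted rest (fun x => x) false)

-- ===== PRECONDITION & SPEC =====
-- Pre_ excludes exactly the inputs on which mainArray.pop(idx) raises IndexError.
def Pre_isArrayClassified (mainArray : List Int) (idx : Int) : Prop :=
  -(mainArray.length : Int) ≤ idx ∧ idx < (mainArray.length : Int)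
instance (mainArray : List Int) (idx : Int) : Decidable (Pre_isArrayClassified mainArray idx) := by
  unfold Pre_isArrayClassified; infer_instance
def pvWitness_isArrayClassified : List Int × Int := ([3, 1, 2], 0)

def Spec_isArrayClassified (mainArray : List Int) (idx : Int) (out : Bool) : Prop := out = isArrayClassified_alt mainArray idx
instance (mainArray : List Int) (idx : Int) (out : Bool) : Decidable (Spec_isArrayClassified mainArray idx out) := by unfold Spec_isArrayClassified; infer_instance

-- ===== CLAIM (what is proved, stated in full; the proofs are below) =====
def Claim_equal_isArrayClassified : Prop := ∀ (mainArray : List Int) (idx : Int), Dom_isArrayClassified mainArray idx → Pre_isArrayClassified mainArray idx → Spec_isArrayClassified mainArray idx (isArrayClassified mainArray idx)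

-- ===== LEMMAS AND PROOFS =====
theorem pvScanA_iff_chain (xs : List Int) : pvScanA xs = true ↔ List.IsChain (fun a b : Int => a ≤ b) xs := by
  induction xs with
  | nil => simp [pvScanA]
  | cons a t ih =>
    cases t with
    | nil => simp [pvScanA]
    | cons b u =>
      by_cases h : a > b
      · simp [pvScanA, h, List.isChain_cons_cons]
      · simp only [pvScanA, if_neg h, ih, List.isChain_cons_cons]
        constructor
        · intro hc; exact ⟨by omega, hc⟩
        · intro hc; exact hc.2

theorem pvScanA_eq_sorted_check (xs : List Int) :
    pvScanA xs = decide (xs = PySem.List.sorted xs (fun x => x) false) := by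
  by_cases h : List.IsChain (fun a b : Int => a ≤ b) xs
  · have hp : xs.Pairwise (fun a b : Int => a ≤ b) := List.isChain_iff_pairwise.mp h
    have hs : PySem.List.sorted xs (fun x => x) false = xs :=
      PySem.List.sorted_eq_self_of_pairwise xs (fun x => x) hp
    simp [(pvScanA_iff_chain xs).mpr h, hs]
  · have hns : ¬ (xs = PySem.List.sorted xs (fun x => x) false) := by
      intro he
      apply h
      apply List.isChain_iff_pairwise.mpr
      have hpw := PySem.List.sorted_pairwise xs (fun x => x) (κ := Int)
      rw [← he] at hpw
      exact hpw
    have hf : pvScanA xs = false := by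
      cases hb : pvScanA xs
      · rfl
      · exact absurd ((pvScanA_iff_chain xs).mp hb) h
    simp [hf, hns]

-- ===== VERDICT (by name: the statement is the Claim_ definition above) =====
theorem isArrayClassified_spec : Claim_equal_isArrayClassified := by
  intro mainArray idx _ _
  unfold Spec_isArrayClassified isArrayClassified isArrayClassified_alt
  cases h : PySem.List.pop? mainArray idx with
  | none => rfl
  | some r => exact pvScanA_eq_sorted_check r.2
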